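-- pv_equiv track=rewrite | github.com/ryandancy/project-euler | problem80.py | sqrt_digit_sum
-- ===== SOURCE A (Python) =====
-- def sqrt_digit_sum(n): # 0 < n < 100
--   found = 0
--   sum_ = 0
--   current = n
--
--   for _ in range(100):
--     found10 = 10*found
--     found20 = 2*found10
--
--     x = 0
--     while x * (found20 + x) <= current:
--       x += 1
--     x -= 1
--     y = x * (found20 + x)
--
--     sum_ += x
--     found = found10 + x
--     current = (current - y) * 100
--
--     if current == 0:
--       # not irrational
--       return 0
--
--   return sum_
-- ===== SOURCE B (Python) =====
-- def sqrt_digit_sum(n): # 0 < n < 100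
--   def isqrt(v):
--     lo, hi = 0, v + 1
--     while hi - lo > 1:
--       mid = (lo + hi) // 2
--       if mid * mid <= v:
--         lo = mid
--       else:
--         hi = mid
--     return lo
--   r = isqrt(n)
--   if r * r == n:
--     return 0
--   m = isqrt(n * 10**198)
--   head, tail = divmod(m, 10**99)
--   s = head
--   while tail:
--     s += tail % 10
--     tail //= 10
--   return s
-- ===== Notes on version B (the rewrite author's own statement) =====
-- stated objective: alternative
-- what changed: Replaces the hundred-step digit-by-digit square-root extraction (whose first step scans x upward until it passes isqrt(n)) by a single binary-search integer square root of the scaled radicand, followed by an arithmetic digit sum of the leading chunk and of the remaining decimal digits of that root.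
-- outside the precondition, e.g. on sqrt_digit_sum(-1): A returns -100, B returns 0
import Mathlib
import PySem

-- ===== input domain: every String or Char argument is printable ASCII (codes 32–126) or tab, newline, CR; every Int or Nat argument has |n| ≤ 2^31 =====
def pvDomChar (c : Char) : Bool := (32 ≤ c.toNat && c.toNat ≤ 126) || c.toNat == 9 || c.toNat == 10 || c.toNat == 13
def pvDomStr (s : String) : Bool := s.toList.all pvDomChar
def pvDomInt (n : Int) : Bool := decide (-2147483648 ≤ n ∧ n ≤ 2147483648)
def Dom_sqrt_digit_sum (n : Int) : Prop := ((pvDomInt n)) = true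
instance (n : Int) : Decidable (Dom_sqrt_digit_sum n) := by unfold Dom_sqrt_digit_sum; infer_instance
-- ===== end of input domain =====

-- B replaces the digit-by-digit root extraction by one binary-search integer square root of
-- the scaled radicand plus an arithmetic digit sum; equivalence is proved for nonnegative n.

-- ===== PORT A =====

-- termination lemma for pvAInner (cited by name in decreasing_by)
theorem pvAInner_dec (found20 current : Int) (x : Nat) (h : (x : Int) * (found20 + x) ≤ current) :
    current.toNat + found20.natAbs + 2 - (x + 1) < current.toNat + found20.natAbs + 2 - x := by
  have hb : (x : Int) ≤ (current.toNat : Int) + found20.natAbs + 1 := by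
    by_contra hgt
    push Not at hgt
    have h1 : (1 : Int) ≤ (x : Int) := by omega
    have h2 : current + 1 ≤ found20 + (x : Int) := by omega
    have h3 : (0 : Int) < found20 + (x : Int) := by omega
    nlinarith [h]
  omega

-- the inner `while x * (found20 + x) <= current: x += 1` loop; returns the final x - 1
def pvAInner (found20 current : Int) (x : Nat) : Int :=
  if h : (x : Int) * (found20 + x) ≤ current then
    pvAInner found20 current (x + 1)
  else
    (x : Int) - 1
termination_by current.toNat + found20.natAbs + 2 - x
decreasing_by exact pvAInner_dec found20 current x h

def pvAOuter : Nat → Int → Int → Int → Int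
  | 0, _, sum_, _ => sum_
  | (k+1), found, sum_, current =>
    let found10 := 10 * found
    let found20 := 2 * found10
    let x := pvAInner found20 current 0
    let y := x * (found20 + x)
    let sum' := sum_ + x
    let found' := found10 + x
    let current' := (current - y) * 100
    if current' = 0 then 0 else pvAOuter k found' sum' current'

def sqrt_digit_sum (n : Int) : Int := pvAOuter 100 0 0 n

-- ===== PORT B =====

-- termination lemmas for pvBSearch (cited by name in decreasing_by)
theorem pvBSearch_dec1 (lo hi : Int) (h : 1 < hi - lo) :
    (hi - PySem.Int.floordiv (lo + hi) 2).toNat < (hi - lo).toNat := by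
  have h1 : lo + 1 ≤ PySem.Int.floordiv (lo + hi) 2 := by
    rw [PySem.Int.le_floordiv_iff_mul_le (by omega)]; omega
  have h2 : PySem.Int.floordiv (lo + hi) 2 < hi := by
    rw [PySem.Int.floordiv_lt_iff_lt_mul (by omega)]; omega
  omega

theorem pvBSearch_dec2 (lo hi : Int) (h : 1 < hi - lo) :
    (PySem.Int.floordiv (lo + hi) 2 - lo).toNat < (hi - lo).toNat := by
  have h1 : lo + 1 ≤ PySem.Int.floordiv (lo + hi) 2 := by
    rw [PySem.Int.le_floordiv_iff_mul_le (by omega)]; omega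
  have h2 : PySem.Int.floordiv (lo + hi) 2 < hi := by
    rw [PySem.Int.floordiv_lt_iff_lt_mul (by omega)]; omega
  omega

-- binary search: `while hi - lo > 1: mid = (lo+hi)//2; ...`
def pvBSearch (v lo hi : Int) : Int :=
  if h : 1 < hi - lo then
    if PySem.Int.floordiv (lo + hi) 2 * PySem.Int.floordiv (lo + hi) 2 ≤ v then
      pvBSearch v (PySem.Int.floordiv (lo + hi) 2) hi
    else
      pvBSearch v lo (PySem.Int.floordiv (lo + hi) 2)
  else lo
termination_by (hi - lo).toNat
decreasing_by
  · exact pvBSearch_dec1 lo hi h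
  · exact pvBSearch_dec2 lo hi h

def pvBIsqrt (v : Int) : Int := pvBSearch v 0 (v + 1)

-- termination lemma for pvBDigits (cited by name in decreasing_by)
theorem pvBDigits_dec (tail : Int) (h : 0 < tail) :
    (PySem.Int.floordiv tail 10).toNat < tail.toNat := by
  rw [PySem.Int.floordiv_eq_ediv_of_pos (by omega : (0:Int) < 10)]
  omega

-- `while tail: s += tail % 10; tail //= 10` (tail is always a nonnegative remainder)
def pvBDigits (tail s : Int) : Int :=
  if h : 0 < tail then
    pvBDigits (PySem.Int.floordiv tail 10) (s + PySem.Int.mod tail 10)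
  else s
termination_by tail.toNat
decreasing_by exact pvBDigits_dec tail h

def sqrt_digit_sum_alt (n : Int) : Int :=
  let r := pvBIsqrt n
  if r * r = n then 0
  else
    let m := pvBIsqrt (n * 10 ^ 198)
    let head := PySem.Int.floordiv m (10 ^ 99)
    let tail := PySem.Int.mod m (10 ^ 99)
    pvBDigits tail head

-- ===== PRECONDITION & SPEC =====
-- Pre_ excludes negative n, outside the function's documented domain (square roots of
-- negatives are undefined); there A's extraction loop returns meaningless negative values.
def Pre_sqrt_digit_sum (n : Int) : Prop := 0 ≤ n
instance (n : Int) : Decidable (Pre_sqrt_digit_sum n) := by unfold Pre_sqrt_digit_sum; infer_instance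

def pvWitness_sqrt_digit_sum : Int := 2

def Spec_sqrt_digit_sum (n : Int) (out : Int) : Prop := out = sqrt_digit_sum_alt n
instance (n : Int) (out : Int) : Decidable (Spec_sqrt_digit_sum n out) := by unfold Spec_sqrt_digit_sum; infer_instance

-- ===== CLAIM (what is proved, stated in full; the proofs are below) =====
def Claim_equal_sqrt_digit_sum : Prop := ∀ (n : Int), Dom_sqrt_digit_sum n → Pre_sqrt_digit_sum n → Spec_sqrt_digit_sum n (sqrt_digit_sum n)

-- ===== LEMMAS AND PROOFS =====

-- unfolding equations of pvAOuter (definitional)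
theorem pvAOuter_zero (found sum_ current : Int) : pvAOuter 0 found sum_ current = sum_ := rfl

theorem pvAOuter_succ (k : Nat) (found sum_ current : Int) :
    pvAOuter (k+1) found sum_ current =
      (if (current - pvAInner (2 * (10 * found)) current 0 *
            (2 * (10 * found) + pvAInner (2 * (10 * found)) current 0)) * 100 = 0 then 0
       else pvAOuter k (10 * found + pvAInner (2 * (10 * found)) current 0)
              (sum_ + pvAInner (2 * (10 * found)) current 0)
              ((current - pvAInner (2 * (10 * found)) current 0 *
                (2 * (10 * found) + pvAInner (2 * (10 * found)) current 0)) * 100)) := rfl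


-- uniqueness of the integer square root characterisation
theorem pvSqrtUnique (v a b : Int) (ha0 : 0 ≤ a) (ha1 : a * a ≤ v) (ha2 : v < (a+1)*(a+1))
    (hb0 : 0 ≤ b) (hb1 : b * b ≤ v) (hb2 : v < (b+1)*(b+1)) : a = b := by
  rcases lt_trichotomy a b with h | h | h
  · nlinarith
  · exact h
  · nlinarith

-- the binary search maintains lo*lo ≤ v < hi*hi
theorem pvBSearch_char (v : Int) : ∀ (lo hi : Int), 0 ≤ lo → lo < hi → lo * lo ≤ v → v < hi * hi →
    0 ≤ pvBSearch v lo hi ∧ (pvBSearch v lo hi) * (pvBSearch v lo hi) ≤ v ∧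
      v < (pvBSearch v lo hi + 1) * (pvBSearch v lo hi + 1) := by
  intro lo hi
  induction lo, hi using pvBSearch.induct v with
  | case1 lo hi h hcond ih =>
    intro h0 hlt h1 h2
    have hmid1 : lo + 1 ≤ PySem.Int.floordiv (lo + hi) 2 := by
      rw [PySem.Int.le_floordiv_iff_mul_le (by omega)]; omega
    have hmid2 : PySem.Int.floordiv (lo + hi) 2 < hi := by
      rw [PySem.Int.floordiv_lt_iff_lt_mul (by omega)]; omega
    rw [pvBSearch, dif_pos h, if_pos hcond]
    exact ih (by omega) (by omega) hcond h2
  | case2 lo hi h hcond ih =>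
    intro h0 hlt h1 h2
    have hmid1 : lo + 1 ≤ PySem.Int.floordiv (lo + hi) 2 := by
      rw [PySem.Int.le_floordiv_iff_mul_le (by omega)]; omega
    have hmid2 : PySem.Int.floordiv (lo + hi) 2 < hi := by
      rw [PySem.Int.floordiv_lt_iff_lt_mul (by omega)]; omega
    rw [pvBSearch, dif_pos h, if_neg hcond]
    push Not at hcond
    exact ih h0 (by omega) h1 hcond
  | case3 lo hi h =>
    intro h0 hlt h1 h2
    rw [pvBSearch, dif_neg h]
    have hhi : hi = lo + 1 := by omega
    subst hhi
    exact ⟨h0, h1, h2⟩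

theorem pvBIsqrt_char (v : Int) (hv : 0 ≤ v) :
    0 ≤ pvBIsqrt v ∧ (pvBIsqrt v) * (pvBIsqrt v) ≤ v ∧ v < (pvBIsqrt v + 1) * (pvBIsqrt v + 1) := by
  exact pvBSearch_char v 0 (v + 1) le_rfl (by omega) (by simpa using hv) (by nlinarith)

-- A's inner scan returns s - 10*f where s is the integer square root of 100*f*f + c
theorem pvAInner_loop (f c s : Int) (hf : 0 ≤ f) (hc : 0 ≤ c) (hfs : 10 * f ≤ s)
    (h1 : s * s ≤ 100 * f * f + c) (h2 : 100 * f * f + c < (s+1)*(s+1)) :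
    ∀ (d x : Nat), (x : Int) + d = s - 10 * f + 1 → pvAInner (20 * f) c x = s - 10 * f := by
  intro d
  induction d with
  | zero =>
    intro x hx
    have hxe : (x : Int) = s - 10 * f + 1 := by omega
    have hcond : ¬ ((x : Int) * (20 * f + x) ≤ c) := by nlinarith
    rw [pvAInner, dif_neg hcond]
    omega
  | succ d ih =>
    intro x hx
    have hxle : (x : Int) ≤ s - 10 * f := by omega
    have hxnn : (0 : Int) ≤ (x : Int) := Int.natCast_nonneg _
    have hcond : (x : Int) * (20 * f + x) ≤ c := by nlinarith
    rw [pvAInner, dif_pos hcond]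
    apply ih
    push_cast
    omega

-- the digit-sum loop with accumulator
theorem pvBDigits_acc (t : Int) (ht : 0 ≤ t) : ∀ (s : Int), pvBDigits t s = s + pvBDigits t 0 := by
  intro s
  by_cases h : 0 < t
  · have hd0 : 0 ≤ PySem.Int.floordiv t 10 := by
      rw [PySem.Int.floordiv_eq_ediv_of_pos (by omega : (0:Int) < 10)]; omega
    rw [pvBDigits, dif_pos h]
    conv_rhs => rw [pvBDigits, dif_pos h]
    rw [pvBDigits_acc _ hd0 (s + PySem.Int.mod t 10),
        pvBDigits_acc _ hd0 (0 + PySem.Int.mod t 10)]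
    ring
  · rw [pvBDigits, dif_neg h]
    conv_rhs => rw [pvBDigits, dif_neg h]
    ring
termination_by t.toNat
decreasing_by
  all_goals
    rw [PySem.Int.floordiv_eq_ediv_of_pos (by omega : (0:Int) < 10)]
    omega

theorem pvBDigits_zero : pvBDigits 0 0 = 0 := by
  rw [pvBDigits]; norm_num

-- one unfolding of the digit-sum loop, in ediv/emod form
theorem pvBDigits_pos (t : Int) (h : 0 < t) :
    pvBDigits t 0 = t % 10 + pvBDigits (t / 10) 0 := by
  have hmod : PySem.Int.mod t 10 = t % 10 := PySem.Int.mod_eq_emod_of_pos (by omega)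
  have hdiv : PySem.Int.floordiv t 10 = t / 10 := PySem.Int.floordiv_eq_ediv_of_pos (by omega)
  rw [pvBDigits, dif_pos h, hmod, hdiv, pvBDigits_acc (t / 10) (by omega) (0 + t % 10)]
  ring

theorem pvBDigits_single (x : Int) (h0 : 0 ≤ x) (h9 : x < 10) : pvBDigits x 0 = x := by
  by_cases h : 0 < x
  · rw [pvBDigits_pos x h]
    have h1 : x % 10 = x := by omega
    have h2 : x / 10 = 0 := by omega
    rw [h1, h2, pvBDigits_zero]
    ring
  · have : x = 0 := by omega
    rw [this, pvBDigits_zero]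

-- splitting off the k low digits
theorem pvBDigits_split : ∀ (k : Nat) (x t : Int), 0 ≤ x → 0 ≤ t → t < 10 ^ k →
    pvBDigits (x * 10 ^ k + t) 0 = pvBDigits x 0 + pvBDigits t 0 := by
  intro k
  induction k with
  | zero =>
    intro x t hx ht htk
    have : t = 0 := by norm_num at htk; omega
    subst this
    rw [pvBDigits_zero]
    norm_num
  | succ k ih =>
    intro x t hx ht htk
    have htenk : (0:Int) < 10 ^ k := by positivity
    have hpow : (10:Int) ^ (k+1) = 10 ^ k * 10 := by ring
    by_cases ha : 0 < x * 10 ^ (k+1) + t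
    · have hdiv : (x * 10 ^ (k+1) + t) / 10 = x * 10 ^ k + t / 10 := by
        rw [hpow, show x * (10 ^ k * 10) + t = t + (x * 10 ^ k) * 10 by ring]
        rw [Int.add_mul_ediv_right _ _ (by omega : (10:Int) ≠ 0)]
        omega
      have hmod : (x * 10 ^ (k+1) + t) % 10 = t % 10 := by
        rw [hpow, show x * (10 ^ k * 10) + t = t + (x * 10 ^ k) * 10 by ring]
        rw [Int.add_mul_emod_self_right]
      rw [pvBDigits_pos _ ha, hdiv, hmod, ih x (t / 10) hx (by omega) (by omega)]
      by_cases htp : 0 < t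
      · rw [pvBDigits_pos t htp]
        ring
      · have ht0 : t = 0 := by omega
        subst ht0
        norm_num [pvBDigits_zero]
    · have hx0 : x = 0 ∧ t = 0 := by
        constructor <;> nlinarith
      rw [hx0.1, hx0.2]
      norm_num [pvBDigits_zero]

-- non-squares stay non-squares under multiplication by 100
theorem pvNotSqNat (u A : Nat) (h : u * u = 100 * A) : ∃ w, u = 10 * w ∧ w * w = A := by
  have h2 : 2 ∣ u := by
    have : (2:Nat) ∣ u ^ 2 := by rw [pow_two, h]; exact ⟨50 * A, by ring⟩
    exact Nat.Prime.dvd_of_dvd_pow Nat.prime_two this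
  have h5 : 5 ∣ u := by
    have : (5:Nat) ∣ u ^ 2 := by rw [pow_two, h]; exact ⟨20 * A, by ring⟩
    exact Nat.Prime.dvd_of_dvd_pow Nat.prime_five this
  have h10 : 10 ∣ u := Nat.Coprime.mul_dvd_of_dvd_of_dvd (by decide) h2 h5
  obtain ⟨w, hw⟩ := h10
  refine ⟨w, hw, ?_⟩
  subst hw
  nlinarith

theorem pvNotSqScale (a : Int) (hns : ∀ t : Int, 0 ≤ t → t * t ≠ a) :
    ∀ t : Int, 0 ≤ t → t * t ≠ 100 * a := by
  intro t ht heq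
  have ha : 0 ≤ a := by nlinarith
  have hnat : t.toNat * t.toNat = 100 * a.toNat := by
    have h1 : ((t.toNat * t.toNat : Nat) : Int) = ((100 * a.toNat : Nat) : Int) := by
      push_cast
      rw [Int.toNat_of_nonneg ht, Int.toNat_of_nonneg ha]
      linarith
    exact_mod_cast h1
  obtain ⟨w, hw, hww⟩ := pvNotSqNat t.toNat a.toNat hnat
  apply hns (w : Int) (Int.natCast_nonneg _)
  have h2 : ((w * w : Nat) : Int) = (a.toNat : Int) := by rw [hww]
  push_cast at h2
  rw [Int.toNat_of_nonneg ha] at h2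
  exact h2

theorem pvNotSqPow (n0 : Int) (hns : ∀ t : Int, 0 ≤ t → t * t ≠ n0) :
    ∀ (i : Nat) (t : Int), 0 ≤ t → t * t ≠ n0 * 100 ^ i := by
  intro i
  induction i with
  | zero => simpa using hns
  | succ i ih =>
    have h : n0 * 100 ^ (i + 1) = 100 * (n0 * 100 ^ i) := by ring
    rw [h]
    exact pvNotSqScale _ ih

-- the main outer-loop characterisation
theorem pvAOuter_main (n0 : Int) (hn : 1 ≤ n0)
    (hns : ∀ (i : Nat) (t : Int), 0 ≤ t → t * t ≠ n0 * 100 ^ i) :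
    ∀ (k j : Nat) (f sum : Int), 0 ≤ f → f * f ≤ n0 * 100 ^ j → n0 * 100 ^ j < (f+1)*(f+1) →
    ∃ t : Int, 0 ≤ t ∧ t < 10 ^ k ∧
      (f * 10 ^ k + t) * (f * 10 ^ k + t) ≤ n0 * 100 ^ (j + k) ∧
      n0 * 100 ^ (j + k) < (f * 10 ^ k + t + 1) * (f * 10 ^ k + t + 1) ∧
      pvAOuter k f sum (100 * (n0 * 100 ^ j - f * f)) = sum + pvBDigits t 0 := by
  intro k
  induction k with
  | zero =>
    intro j f sum hf hf1 hf2
    refine ⟨0, le_rfl, by norm_num, by simpa using hf1, by simpa using hf2, ?_⟩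
    rw [pvBDigits_zero, pvAOuter_zero]
    ring
  | succ k ih =>
    intro j f sum hf hf1 hf2
    set N := n0 * 100 ^ j with hN
    have hNpos : 1 ≤ N := by
      have : (1:Int) ≤ 100 ^ j := one_le_pow₀ (by omega)
      nlinarith
    have hfN : f * f < N := lt_of_le_of_ne hf1 (hns j f hf)
    set s := pvBIsqrt (100 * N) with hs
    obtain ⟨hs0, hs1, hs2⟩ := pvBIsqrt_char (100 * N) (by omega)
    have h10f : 10 * f ≤ s := by nlinarith
    have hs9 : s ≤ 10 * f + 9 := by nlinarith
    have hx : pvAInner (2 * (10 * f)) (100 * (N - f * f)) 0 = s - 10 * f := by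
      have h20 : (2 : Int) * (10 * f) = 20 * f := by ring
      rw [h20]
      exact pvAInner_loop f (100 * (N - f * f)) s hf (by nlinarith) h10f
        (by linarith) (by nlinarith) ((s - 10 * f + 1).toNat) 0
        (by push_cast; rw [Int.toNat_of_nonneg (by omega)]; omega)
    have hNsq : s * s ≠ 100 * N := by
      intro he
      apply hns (j + 1) s hs0
      rw [he, hN]; ring
    have h100N : n0 * 100 ^ (j + 1) = 100 * N := by rw [hN]; ring
    have hcur : ((100 * (N - f * f) - (s - 10 * f) * (2 * (10 * f) + (s - 10 * f))) * 100)
        = 100 * (n0 * 100 ^ (j + 1) - s * s) := by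
      rw [h100N]; ring
    have hcne : (100 * (N - f * f) - (s - 10 * f) * (2 * (10 * f) + (s - 10 * f))) * 100 ≠ 0 := by
      rw [hcur, h100N]
      have hlt : s * s < 100 * N := lt_of_le_of_ne hs1 hNsq
      nlinarith
    obtain ⟨t', ht'0, ht'k, ht'1, ht'2, ht'eq⟩ := ih (j + 1) s (sum + (s - 10 * f)) hs0
      (by rw [h100N]; exact hs1) (by rw [h100N]; exact hs2)
    refine ⟨(s - 10 * f) * 10 ^ k + t', ?_, ?_, ?_, ?_, ?_⟩
    · have h1 : (0:Int) ≤ (s - 10 * f) * 10 ^ k := mul_nonneg (by omega) (by positivity)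
      omega
    · have hp : (10:Int) ^ (k+1) = 10 * 10 ^ k := by ring
      have hpk : (0:Int) < 10 ^ k := by positivity
      nlinarith
    · have harith : f * 10 ^ (k+1) + ((s - 10 * f) * 10 ^ k + t') = s * 10 ^ k + t' := by ring
      have hexp : j + (k + 1) = (j + 1) + k := by omega
      rw [harith, hexp]
      exact ht'1
    · have harith : f * 10 ^ (k+1) + ((s - 10 * f) * 10 ^ k + t') + 1 = s * 10 ^ k + t' + 1 := by ring
      have hexp : j + (k + 1) = (j + 1) + k := by omega
      rw [harith, hexp]
      exact ht'2
    · rw [pvAOuter_succ, hx, if_neg hcne, hcur]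
      have hfound : 10 * f + (s - 10 * f) = s := by ring
      rw [hfound, ht'eq]
      rw [pvBDigits_split k (s - 10 * f) t' (by omega) ht'0 ht'k]
      rw [pvBDigits_single (s - 10 * f) (by omega) (by omega)]
      ring

-- ===== VERDICT (by name: the statement is the Claim_ definition above) =====
theorem sqrt_digit_sum_spec : Claim_equal_sqrt_digit_sum := by
  intro n hdom hpre
  unfold Pre_sqrt_digit_sum at hpre
  unfold Spec_sqrt_digit_sum
  set r := pvBIsqrt n with hr
  obtain ⟨hr0, hr1, hr2⟩ := pvBIsqrt_char n hpre
  have hx : pvAInner (2 * (10 * 0)) n 0 = r := by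
    have h0 : (2 : Int) * (10 * 0) = 20 * 0 := by ring
    rw [h0]
    have := pvAInner_loop 0 n r le_rfl hpre (by omega)
      (by linarith) (by linarith) ((r + 1).toNat) 0
      (by push_cast; rw [Int.toNat_of_nonneg (by omega)]; omega)
    simpa using this
  by_cases hsq : r * r = n
  · -- perfect square: both return 0
    have hA : sqrt_digit_sum n = 0 := by
      unfold sqrt_digit_sum
      show pvAOuter (99+1) 0 0 n = 0
      rw [pvAOuter_succ, hx, if_pos (by rw [← hsq]; ring)]
    have hB : sqrt_digit_sum_alt n = 0 := by
      unfold sqrt_digit_sum_alt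
      rw [← hr, if_pos hsq]
    rw [hA, hB]
  · -- non-square
    have hn1 : 1 ≤ n := by
      rcases eq_or_lt_of_le hpre with h | h
      · exfalso; apply hsq; nlinarith
      · omega
    have hnotsq : ∀ t : Int, 0 ≤ t → t * t ≠ n := by
      intro t ht he
      apply hsq
      have heq : t = r := pvSqrtUnique n t r ht (le_of_eq he) (by nlinarith) hr0 hr1 hr2
      rw [← heq, he]
    have hns := pvNotSqPow n hnotsq
    have hstep : sqrt_digit_sum n = pvAOuter 99 (10 * 0 + r) (0 + r) ((n - r * (2 * (10 * 0) + r)) * 100) := by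
      unfold sqrt_digit_sum
      show pvAOuter (99+1) 0 0 n = _
      rw [pvAOuter_succ, hx, if_neg]
      have hlt : r * r < n := lt_of_le_of_ne hr1 hsq
      have he : (n - r * (2 * (10 * 0) + r)) * 100 = (n - r * r) * 100 := by ring
      rw [he]
      nlinarith
    obtain ⟨t, ht0, htk, ht1, ht2, hteq⟩ := pvAOuter_main n hn1 hns 99 0 r r hr0
      (by simpa using hr1) (by simpa using hr2)
    have hmatch : (n - r * (2 * (10 * 0) + r)) * 100 = 100 * (n * 100 ^ 0 - r * r) := by ring
    have hsimp : (10 : Int) * 0 + r = r := by ring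
    have hsum0 : (0 : Int) + r = r := by ring
    rw [hstep, hsimp, hsum0, hmatch, hteq]
    -- now the B side
    have hscale : n * 10 ^ 198 = n * 100 ^ (0 + 99) := by norm_num
    set g := r * 10 ^ 99 + t with hg
    have hg0 : 0 ≤ g := by positivity
    obtain ⟨hm0, hm1, hm2⟩ := pvBIsqrt_char (n * 10 ^ 198) (by positivity)
    have hmg : pvBIsqrt (n * 10 ^ 198) = g := by
      apply pvSqrtUnique (n * 10 ^ 198) _ g hm0 hm1 hm2 hg0
      · rw [hscale]; exact ht1
      · rw [hscale]; exact ht2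
    have hpow99 : (0:Int) < 10 ^ 99 := by positivity
    have hhead : PySem.Int.floordiv g (10 ^ 99) = r := by
      rw [PySem.Int.floordiv_eq_ediv_of_pos hpow99, hg]
      rw [show r * 10 ^ 99 + t = t + r * 10 ^ 99 by ring]
      rw [Int.add_mul_ediv_right _ _ (by positivity : (10:Int) ^ 99 ≠ 0)]
      rw [Int.ediv_eq_zero_of_lt ht0 htk]
      ring
    have htail : PySem.Int.mod g (10 ^ 99) = t := by
      rw [PySem.Int.mod_eq_emod_of_pos hpow99, hg]
      rw [show r * 10 ^ 99 + t = t + (10:Int) ^ 99 * r by ring]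
      rw [Int.add_mul_emod_self_left]
      exact Int.emod_eq_of_lt ht0 htk
    have hB : sqrt_digit_sum_alt n = pvBDigits t r := by
      unfold sqrt_digit_sum_alt
      rw [← hr, if_neg hsq]
      simp only
      rw [hmg, hhead, htail]
    rw [hB, pvBDigits_acc t ht0 r]
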